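-- pv_equiv track=rewrite | github.com/bmodhez/Vixogram-Web1.0 | a_users/username_policy.py | is_reserved_username
-- ===== SOURCE A (Python) =====
-- _RESERVED_USERNAMES = {
--     # Admin / privilege
--     'admin',
--     'administrator',
--     'root',
--     'owner',
--     'superuser',
--     'system',
--     'support',
--     'staff',
--     'moderator',
--     'mod',
--     # Official/system-like
--     'official',
--     'security',
--     'developer',
--     'dev',
--     'api',
--     'service',
--     'server',
--     # Auth/account routes
--     'login',
--     'logout',
--     'signup',
--     'signin',
--     'register',
--     'dashboard',
--     'account',
--     'profile',
--     'settings',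
--     # Common hostnames / infra
--     'www',
--     'mail',
--     'ftp',
--     'smtp',
--     'http',
--     'https',
--     'cdn',
--     'static',
--     'media',
--     'assets',
--     # Trust/abuse flows
--     'verified',
--     'helpdesk',
--     'report',
--     'complaint',
--     # Generic / placeholders
--     'user',
--     'users',
--     'guest',
--     'anonymous',
--     'test',
--     'demo',
-- }
--
-- def _normalize(username: str) -> str:
--     return (username or '').strip().lower()
--
-- def is_reserved_username(username: str) -> bool:
--     u = _normalize(username)
--     if not u:
--         return False
--
--     if u in _RESERVED_USERNAMES:
--         return True
--
--     # Block simple variants like "admin1", "admin_1", "admin-1", "admin.1".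
--     for base in _RESERVED_USERNAMES:
--         if u == base:
--             return True
--         if u.startswith(base):
--             rest = u[len(base):]
--             if not rest:
--                 return True
--
--             # Allow only a separator and digits (or just digits) to count as a reserved variant.
--             # Examples blocked: admin1, admin_1, admin-123, admin.9
--             # Examples allowed: adminx (not numeric impersonation)
--             if rest.isdigit():
--                 return True
--             if len(rest) >= 2 and rest[0] in {'_', '-', '.'} and rest[1:].isdigit():
--                 return True
--
--     return False
-- ===== SOURCE B (Python) =====
-- _RESERVED_USERNAMES = {
--     # Admin / privilege
--     'admin',
--     'administrator',
--     'root',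
--     'owner',
--     'superuser',
--     'system',
--     'support',
--     'staff',
--     'moderator',
--     'mod',
--     # Official/system-like
--     'official',
--     'security',
--     'developer',
--     'dev',
--     'api',
--     'service',
--     'server',
--     # Auth/account routes
--     'login',
--     'logout',
--     'signup',
--     'signin',
--     'register',
--     'dashboard',
--     'account',
--     'profile',
--     'settings',
--     # Common hostnames / infra
--     'www',
--     'mail',
--     'ftp',
--     'smtp',
--     'http',
--     'https',
--     'cdn',
--     'static',
--     'media',
--     'assets',
--     # Trust/abuse flows
--     'verified',
--     'helpdesk',
--     'report',
--     'complaint',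
--     # Generic / placeholders
--     'user',
--     'users',
--     'guest',
--     'anonymous',
--     'test',
--     'demo',
-- }
--
-- _SEPARATORS = {'_', '-', '.'}
--
-- def _normalize(username: str) -> str:
--     return (username or '').strip().lower()
--
-- def is_reserved_username(username: str) -> bool:
--     u = _normalize(username)
--     if not u:
--         return False
--     if u in _RESERVED_USERNAMES:
--         return True
--     # Parse the suffix once: walk backwards over the trailing digit run.
--     i = len(u)
--     while i > 0 and u[i - 1].isdigit():
--         i -= 1
--     if i == len(u):
--         return False  # no trailing digits -> no numeric variant
--     if u[:i] in _RESERVED_USERNAMES: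
--         return True
--     if i > 0 and u[i - 1] in _SEPARATORS and u[:i - 1] in _RESERVED_USERNAMES:
--         return True
--     return False
-- ===== Notes on version B (the rewrite author's own statement) =====
-- stated objective: idiomatic
-- what changed: Instead of scanning all 46 reserved names and testing startswith plus a suffix check for each, B parses the username's trailing digit run once (walking backwards) and then does at most two direct set lookups (the stem, and the stem minus one separator).
import Mathlib
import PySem

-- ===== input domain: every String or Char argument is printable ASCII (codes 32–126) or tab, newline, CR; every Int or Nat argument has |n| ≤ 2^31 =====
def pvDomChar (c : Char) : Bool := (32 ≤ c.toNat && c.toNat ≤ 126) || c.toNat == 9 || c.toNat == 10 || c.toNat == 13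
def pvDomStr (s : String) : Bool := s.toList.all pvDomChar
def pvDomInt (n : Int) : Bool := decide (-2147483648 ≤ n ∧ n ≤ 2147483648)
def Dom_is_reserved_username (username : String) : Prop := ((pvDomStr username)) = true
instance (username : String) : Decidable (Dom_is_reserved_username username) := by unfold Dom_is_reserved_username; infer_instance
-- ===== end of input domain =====

-- B replaces A's scan over all 46 reserved names (startswith + suffix check for each) by one backwards
-- parse of the trailing digit run followed by at most two set lookups (idiomatic; same observable behaviour).

-- ===== PORT A =====
-- the module-level set _RESERVED_USERNAMES (distinct elements, insertion order)
def pvReservedUsernames : List (List Char) :=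
  ["admin","administrator","root","owner","superuser","system","support","staff","moderator","mod",
   "official","security","developer","dev","api","service","server",
   "login","logout","signup","signin","register","dashboard","account","profile","settings",
   "www","mail","ftp","smtp","http","https","cdn","static","media","assets",
   "verified","helpdesk","report","complaint",
   "user","users","guest","anonymous","test","demo"].map String.toList

-- _normalize: (username or '').strip().lower()  ('username or ""' is the identity on str inputs)
def pvNormalize (username : String) : List Char :=
  PySem.Chars.lower (PySem.Chars.strip username.toList)

-- the body of A's for-loop for one base
def pvIsVariantOf (u base : List Char) : Bool :=
  if u = base then true
  else if PySem.Chars.startswith u base then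
    let rest := PySem.List.slice u (some (PySem.Chars.len base)) none  -- u[len(base):]
    if rest.isEmpty then true
    else if PySem.Chars.strIsdigit rest then true
    else if 2 ≤ PySem.Chars.len rest then
      ((PySem.List.pyGet? rest 0).elim false fun c => c == '_' || c == '-' || c == '.')  -- rest[0] in {'_','-','.'}
        && PySem.Chars.strIsdigit (PySem.List.slice rest (some 1) none)                  -- rest[1:].isdigit()
    else false
  else false

def is_reserved_username (username : String) : Bool :=
  let u := pvNormalize username
  if u.isEmpty then false
  else if pvReservedUsernames.contains u then true
  else pvReservedUsernames.any (fun base => pvIsVariantOf u base)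

-- ===== PORT B =====
def pvSep (c : Char) : Bool := c == '_' || c == '-' || c == '.'

def is_reserved_username_alt (username : String) : Bool :=
  let u := pvNormalize username
  if u.isEmpty then false
  else if pvReservedUsernames.contains u then true
  else
    -- the backwards while-loop consuming the trailing digit run; rstem is u[:i] reversed
    let rstem := u.reverse.dropWhile PySem.Chars.isdigit
    if rstem.length = u.length then false                            -- i == len(u): no trailing digits
    else if pvReservedUsernames.contains rstem.reverse then true     -- u[:i] in _RESERVED_USERNAMES
    else match rstem with      -- i > 0 and u[i-1] in _SEPARATORS and u[:i-1] in _RESERVED_USERNAMES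
      | c :: t => pvSep c && pvReservedUsernames.contains t.reverse
      | [] => false

-- ===== PRECONDITION & SPEC =====
def Spec_is_reserved_username (username : String) (out : Bool) : Prop := out = is_reserved_username_alt username
instance (username : String) (out : Bool) : Decidable (Spec_is_reserved_username username out) := by unfold Spec_is_reserved_username; infer_instance

-- ===== CLAIM (what is proved, stated in full; the proofs are below) =====
def Claim_equal_is_reserved_username : Prop := ∀ (username : String), Dom_is_reserved_username username → Spec_is_reserved_username username (is_reserved_username username)

-- ===== LEMMAS AND PROOFS =====

lemma pvR_ne : ∀ b ∈ pvReservedUsernames, b ≠ [] := by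
  have h : (pvReservedUsernames.all fun b => !b.isEmpty) = true := by decide
  simp only [List.all_eq_true, Bool.not_eq_eq_eq_not, Bool.not_true, List.isEmpty_eq_false_iff] at h
  exact h

lemma pvR_nodig : ∀ b ∈ pvReservedUsernames, ∀ c ∈ b, PySem.Chars.isdigit c = false := by
  have h : (pvReservedUsernames.all fun b => b.all fun c => !PySem.Chars.isdigit c) = true := by decide
  simp only [List.all_eq_true, Bool.not_eq_eq_eq_not, Bool.not_true] at h
  exact h

lemma pvSep_not_digit (c : Char) (h : pvSep c = true) : PySem.Chars.isdigit c = false := by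
  simp only [pvSep, Bool.or_eq_true, beq_iff_eq] at h
  rcases h with (h | h) | h <;> subst h <;> decide

-- dropWhile over an all-true block followed by a failing head
lemma pv_dropWhile_block (p : Char → Bool) (xs ys : List Char)
    (hxs : ∀ c ∈ xs, p c = true)
    (hys : ys = [] ∨ ∃ c t, ys = c :: t ∧ p c = false) :
    (xs ++ ys).dropWhile p = ys := by
  induction xs with
  | nil =>
      rcases hys with h | ⟨c, t, h, hc⟩
      · simp [h]
      · simp [h, hc]
  | cons x xs ih =>
      have hx : p x = true := hxs x (by simp)
      simp only [List.cons_append, List.dropWhile_cons, hx, if_true]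
      exact ih (fun c hc => hxs c (by simp [hc]))

-- dropWhile of u.reverse when u = base ++ tail with base ∈ R (so base's last char is not a digit)
lemma pv_dropWhile_base (base tail : List Char) (hbR : base ∈ pvReservedUsernames)
    (htail : ∀ c ∈ tail, PySem.Chars.isdigit c = true) :
    (base ++ tail).reverse.dropWhile PySem.Chars.isdigit = base.reverse := by
  rw [List.reverse_append]
  apply pv_dropWhile_block
  · intro c hc; exact htail c (by simpa using hc)
  · cases hbr : base.reverse with
    | nil => exact absurd (by simpa using hbr) (pvR_ne base hbR)
    | cons c t =>
        right
        refine ⟨c, t, rfl, pvR_nodig base hbR c ?_⟩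
        have : c ∈ base.reverse := by rw [hbr]; simp
        simpa using this

lemma pv_slice_drop (u : List Char) (n : Nat) :
    PySem.List.slice u (some (n : Int)) none = u.drop n := by
  rw [PySem.List.slice_from u (by positivity)]
  simp

-- slice with a numeral-1 start
lemma pv_slice_one (u : List Char) :
    PySem.List.slice u (some 1) none = u.drop 1 := by
  rw [PySem.List.slice_from u (by norm_num)]
  norm_num

-- the key equivalence: A's scan over the whole set equals B's single suffix parse (u not itself reserved)
lemma pv_scan_eq_parse (u : List Char)
    (hmem : u ∉ pvReservedUsernames) :
    (pvReservedUsernames.any fun base => pvIsVariantOf u base) =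
      (if (u.reverse.dropWhile PySem.Chars.isdigit).length = u.length then false
       else if pvReservedUsernames.contains (u.reverse.dropWhile PySem.Chars.isdigit).reverse then true
       else match u.reverse.dropWhile PySem.Chars.isdigit with
         | c :: t => pvSep c && pvReservedUsernames.contains t.reverse
         | [] => false) := by
  rw [Bool.eq_iff_iff]
  constructor
  · -- A's scan found a match => B's parse succeeds
    intro h
    rw [List.any_eq_true] at h
    obtain ⟨base, hbR, hbv⟩ := h
    simp only [pvIsVariantOf] at hbv
    rw [PySem.Chars.len_eq, pv_slice_drop] at hbv
    split_ifs at hbv with h1 h2 h3 h4 h5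
    · exact absurd (show u ∈ pvReservedUsernames by rw [h1]; exact hbR) hmem
    · -- rest empty: u = base, contradiction with hmem
      obtain ⟨tail, htail⟩ := (PySem.Chars.startswith_iff u base).mp h2
      subst htail
      rw [List.drop_left, List.isEmpty_iff] at h3
      exact absurd (by simpa [h3] using hbR) hmem
    · -- rest is all digits
      obtain ⟨tail, htail⟩ := (PySem.Chars.startswith_iff u base).mp h2
      subst htail
      rw [List.drop_left] at h3 h4
      simp only [PySem.Chars.strIsdigit, Bool.and_eq_true, List.all_eq_true,
        Bool.not_eq_eq_eq_not, Bool.not_true, List.isEmpty_eq_false_iff] at h4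
      obtain ⟨htne, hdig⟩ := h4
      rw [pv_dropWhile_base base tail hbR hdig]
      have hpos : 0 < tail.length := List.length_pos_iff.mpr htne
      have hlen : base.reverse.length ≠ (base ++ tail).length := by
        simp [List.length_append]; omega
      rw [if_neg hlen, if_pos (by simpa using hbR)]
    · -- rest is a separator followed by digits
      obtain ⟨tail, htail⟩ := (PySem.Chars.startswith_iff u base).mp h2
      subst htail
      rw [List.drop_left] at h3 h4 h5 hbv
      cases tail with
      | nil => simp at h3
      | cons c0 t0 =>
          simp [PySem.List.pyGet?, PySem.List.pyIdx?, pv_slice_one, Bool.and_eq_true] at hbv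
          obtain ⟨hsep, hdig⟩ := hbv
          have hsep' : pvSep c0 = true := by simpa [pvSep] using hsep
          simp only [PySem.Chars.strIsdigit, Bool.and_eq_true, List.all_eq_true,
            Bool.not_eq_eq_eq_not, Bool.not_true, List.isEmpty_eq_false_iff] at hdig
          obtain ⟨ht0ne, ht0dig⟩ := hdig
          have hdw : (base ++ c0 :: t0).reverse.dropWhile PySem.Chars.isdigit
              = c0 :: base.reverse := by
            have hsplit2 : base ++ c0 :: t0 = (base ++ [c0]) ++ t0 := by simp
            rw [hsplit2, List.reverse_append, List.reverse_append]
            apply pv_dropWhile_block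
            · intro c hc; exact ht0dig c (by simpa using hc)
            · right; exact ⟨c0, base.reverse, by simp, pvSep_not_digit c0 hsep'⟩
          rw [hdw]
          have ht0p : 0 < t0.length := List.length_pos_iff.mpr ht0ne
          have hlen : (c0 :: base.reverse).length ≠ (base ++ c0 :: t0).length := by
            simp [List.length_append]; omega
          rw [if_neg hlen]
          by_cases hc : pvReservedUsernames.contains (c0 :: base.reverse).reverse = true
          · rw [if_pos hc]
          · rw [if_neg hc]
            simp [hsep', hbR]
  · -- B's parse succeeds => A's scan finds that base
    intro h
    have hsplit : u.reverse.takeWhile PySem.Chars.isdigit ++ u.reverse.dropWhile PySem.Chars.isdigit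
        = u.reverse := List.takeWhile_append_dropWhile
    set rdigs := u.reverse.takeWhile PySem.Chars.isdigit with hrd
    set rstem := u.reverse.dropWhile PySem.Chars.isdigit with hrs
    have hu : u = rstem.reverse ++ rdigs.reverse := by
      have h2 := congrArg List.reverse hsplit
      simpa using h2.symm
    have hdigs : ∀ c ∈ rdigs, PySem.Chars.isdigit c = true :=
      fun c hc => List.mem_takeWhile_imp hc
    have hsd : PySem.Chars.strIsdigit rdigs.reverse = (!rdigs.isEmpty) := by
      cases hrde : rdigs.isEmpty
      · simp only [PySem.Chars.strIsdigit, Bool.not_false]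
        simp [List.all_eq_true]
        exact ⟨List.isEmpty_eq_false_iff.mp hrde, hdigs⟩
      · have hrdnil : rdigs = [] := by simpa using hrde
        simp [PySem.Chars.strIsdigit, hrdnil]
    split_ifs at h with hL hC
    · -- u[:i] in the reserved set: A matches base := u[:i] with an all-digit rest
      have hrdne : rdigs ≠ [] := by
        intro hnil
        apply hL
        rw [hu, hnil]; simp
      rw [List.any_eq_true]
      refine ⟨rstem.reverse, by simpa using hC, ?_⟩
      simp only [pvIsVariantOf]
      rw [PySem.Chars.len_eq, pv_slice_drop]
      have hne : u ≠ rstem.reverse := by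
        rw [hu]
        intro he
        have hl := congrArg List.length he
        simp at hl
        exact hrdne hl
      rw [if_neg hne]
      have hsw : PySem.Chars.startswith u rstem.reverse = true :=
        (PySem.Chars.startswith_iff u rstem.reverse).mpr ⟨rdigs.reverse, hu.symm⟩
      rw [if_pos hsw]
      have hdrop : u.drop rstem.reverse.length = rdigs.reverse := by
        rw [hu, List.drop_left]
      rw [hdrop, if_neg (by simp [hrdne]), if_pos (by simp [hsd, hrdne])]
    · -- u[i-1] separator, u[:i-1] in the reserved set
      cases hrsc : rstem with
      | nil => rw [hrsc] at h; exact absurd h (by simp)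
      | cons c t =>
          rw [hrsc] at h
          rw [Bool.and_eq_true] at h
          obtain ⟨hsep, hCm⟩ := h
          have hrdne : rdigs ≠ [] := by
            intro hnil
            apply hL
            rw [hu, hnil]; simp
          have hu' : u = t.reverse ++ (c :: rdigs.reverse) := by
            rw [hu, hrsc]; simp
          rw [List.any_eq_true]
          refine ⟨t.reverse, by simpa using hCm, ?_⟩
          simp only [pvIsVariantOf]
          rw [PySem.Chars.len_eq, pv_slice_drop]
          have hne : u ≠ t.reverse := by
            rw [hu']
            intro he
            have hl := congrArg List.length he
            simp at hl
          rw [if_neg hne]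
          have hsw : PySem.Chars.startswith u t.reverse = true :=
            (PySem.Chars.startswith_iff u t.reverse).mpr ⟨c :: rdigs.reverse, hu'.symm⟩
          rw [if_pos hsw]
          have hdrop : u.drop t.reverse.length = c :: rdigs.reverse := by
            rw [hu', List.drop_left]
          rw [hdrop, if_neg (by simp)]
          have hnd : PySem.Chars.strIsdigit (c :: rdigs.reverse) = false := by
            simp [PySem.Chars.strIsdigit, pvSep_not_digit c hsep]
          rw [if_neg (by simp [hnd])]
          have hrdp : 0 < rdigs.length := List.length_pos_iff.mpr hrdne
          have hlen2 : (2 : Int) ≤ PySem.Chars.len (c :: rdigs.reverse) := by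
            rw [PySem.Chars.len_eq]
            simp; omega
          rw [if_pos hlen2, pv_slice_one]
          simp [PySem.List.pyGet?, PySem.List.pyIdx?, Bool.and_eq_true]
          constructor
          · simpa [pvSep] using hsep
          · simp [hsd, hrdne]

-- ===== VERDICT (by name: the statement is the Claim_ definition above) =====
theorem is_reserved_username_spec : Claim_equal_is_reserved_username := by
  intro username _
  unfold Spec_is_reserved_username
  simp only [is_reserved_username, is_reserved_username_alt]
  by_cases hE : (pvNormalize username).isEmpty = true
  · rw [if_pos hE, if_pos hE]
  · rw [if_neg hE, if_neg hE]
    by_cases hC : pvReservedUsernames.contains (pvNormalize username) = true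
    · rw [if_pos hC, if_pos hC]
    · rw [if_neg hC, if_neg hC]
      exact pv_scan_eq_parse _ (by simpa using hC)
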